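-- pv_equiv track=rewrite | github.com/dovvnloading/Graphlink | graphite_app/graphite_app/graphite_plugins/graphite_plugin_code_review.py | _prepare_numbered_source
-- ===== SOURCE A (Python) =====
-- def _prepare_numbered_source(source_text, max_chars=40000):
--     lines = source_text.splitlines() or [source_text]
--     total_lines = len(lines)
--     visible_lines = []
--     current_length = 0
--
--     for index, line in enumerate(lines, start=1):
--         numbered_line = f"{index:04d}: {line}"
--         projected = current_length + len(numbered_line) + 1
--         if visible_lines and projected > max_chars:
--             break
--         visible_lines.append(numbered_line)
--         current_length = projected
--
--     truncated = len(visible_lines) < total_lines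
--     return "\n".join(visible_lines), truncated, total_lines, len(visible_lines)
-- ===== SOURCE B (Python) =====
-- def _prepare_numbered_source(source_text, max_chars=40000):
--     lines = source_text.splitlines() or [source_text]
--     numbered = [f"{i:04d}: {line}" for i, line in enumerate(lines, 1)]
--     prefix = []
--     running = 0
--     for entry in numbered:
--         running += len(entry) + 1
--         prefix.append(running)
--     visible = max(1, sum(1 for p in prefix if p <= max_chars))
--     return (
--         "\n".join(numbered[:visible]),
--         visible < len(lines),
--         len(lines),
--         visible,
--     )
-- ===== Notes on version B (the rewrite author's own statement) =====
-- stated objective: alternative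
-- what changed: A accumulates visible lines in one loop that breaks when the projected length exceeds max_chars; B instead numbers every line up front, builds the list of prefix sums of line lengths (+1 per newline), counts how many sums fit within max_chars (keeping at least one line), and slices the numbered list.
import Mathlib
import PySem

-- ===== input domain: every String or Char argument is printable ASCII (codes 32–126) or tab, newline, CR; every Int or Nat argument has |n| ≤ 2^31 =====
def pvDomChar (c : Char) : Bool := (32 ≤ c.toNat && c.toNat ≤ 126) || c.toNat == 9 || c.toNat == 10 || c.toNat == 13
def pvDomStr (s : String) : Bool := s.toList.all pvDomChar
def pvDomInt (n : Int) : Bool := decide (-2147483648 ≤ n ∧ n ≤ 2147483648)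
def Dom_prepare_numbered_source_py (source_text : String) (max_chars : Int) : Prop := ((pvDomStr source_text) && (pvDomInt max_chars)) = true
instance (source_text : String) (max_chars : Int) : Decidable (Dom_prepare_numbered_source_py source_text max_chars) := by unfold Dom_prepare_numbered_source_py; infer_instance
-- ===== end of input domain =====

-- B replaces A's accumulate-and-break loop by a build-everything decomposition:
-- number all lines, take prefix sums of their lengths, count how many sums fit,
-- and slice; objective: alternative decomposition (same asymptotic cost).

-- ===== PORT A =====

-- f"{index:04d}: {line}" (index here is always ≥ 1, where 04d = zfill 4)
def pvFmt (idx : Int) (line : String) : String :=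
  PySem.Str.zfill (PySem.Int.toStr idx) 4 ++ ": " ++ line

-- the for-loop of A with break: state = (visible_lines, current_length)
def pvLoopA (max_chars : Int) : List (Int × String) → List String → Int → List String
  | [], acc, _ => acc
  | (idx, line) :: rest, acc, cur =>
      let numbered_line := pvFmt idx line
      let projected := cur + PySem.Str.len numbered_line + 1
      if !acc.isEmpty && decide (projected > max_chars) then acc
      else pvLoopA max_chars rest (acc ++ [numbered_line]) projected

def prepare_numbered_source_py (source_text : String) (max_chars : Int) : String × Bool × Int × Int :=
  let lines := let sl := PySem.Str.splitlines source_text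
               if sl.isEmpty then [source_text] else sl
  let total_lines : Int := lines.length
  let visible_lines := pvLoopA max_chars (PySem.List.enumerate lines 1) [] 0
  let truncated := decide ((visible_lines.length : Int) < total_lines)
  (PySem.Str.join "\n" visible_lines, truncated, total_lines, (visible_lines.length : Int))

-- ===== PORT B =====

def prepare_numbered_source_py_alt (source_text : String) (max_chars : Int) : String × Bool × Int × Int :=
  let lines := let sl := PySem.Str.splitlines source_text
               if sl.isEmpty then [source_text] else sl
  let numbered := (PySem.List.enumerate lines 1).map (fun p => pvFmt p.1 p.2)
  -- prefix-sum loop: prefix list and running total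
  let st := numbered.foldl
      (fun (st : List Int × Int) entry =>
        let running := st.2 + PySem.Str.len entry + 1
        (st.1 ++ [running], running)) ([], 0)
  let prefixSums := st.1
  let visible : Int := max 1 ((prefixSums.countP (fun p => decide (p ≤ max_chars))) : Int)
  (PySem.Str.join "\n" (PySem.List.slice numbered none (some visible)),
   decide (visible < (lines.length : Int)),
   (lines.length : Int),
   visible)

-- ===== PRECONDITION & SPEC =====
def Spec_prepare_numbered_source_py (source_text : String) (max_chars : Int) (out : String × Bool × Int × Int) : Prop := out = prepare_numbered_source_py_alt source_text max_chars
instance (source_text : String) (max_chars : Int) (out : String × Bool × Int × Int) : Decidable (Spec_prepare_numbered_source_py source_text max_chars out) := by unfold Spec_prepare_numbered_source_py; infer_instance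

-- ===== CLAIM (what is proved, stated in full; the proofs are below) =====
def Claim_equal_prepare_numbered_source_py : Prop := ∀ (source_text : String) (max_chars : Int), Dom_prepare_numbered_source_py source_text max_chars → Spec_prepare_numbered_source_py source_text max_chars (prepare_numbered_source_py source_text max_chars)

-- ===== LEMMAS AND PROOFS =====

-- how many leading prefix sums (starting from cur) stay ≤ max_chars
def pvCnt (max_chars cur : Int) : List (Int × String) → Nat
  | [] => 0
  | (idx, line) :: rest =>
      let projected := cur + PySem.Str.len (pvFmt idx line) + 1
      if projected ≤ max_chars then pvCnt max_chars projected rest + 1 else 0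

lemma pvLen_nonneg (s : String) : 0 ≤ PySem.Str.len s := by
  rw [PySem.Str.len_eq]; exact Int.natCast_nonneg _

lemma pvCnt_zero (max_chars cur : Int) (ps : List (Int × String)) (h : max_chars < cur) :
    pvCnt max_chars cur ps = 0 := by
  cases ps with
  | nil => rfl
  | cons p rest =>
    obtain ⟨i, l⟩ := p
    have := pvLen_nonneg (pvFmt i l)
    simp only [pvCnt]
    rw [if_neg (by omega)]

lemma pvCnt_le_length (max_chars cur : Int) (ps : List (Int × String)) :
    pvCnt max_chars cur ps ≤ ps.length := by
  induction ps generalizing cur with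
  | nil => simp [pvCnt]
  | cons p r ih =>
    obtain ⟨i, l⟩ := p
    simp only [pvCnt, List.length_cons]
    split
    · exact Nat.succ_le_succ (ih _)
    · omega

lemma pvLoopA_ne (max_chars : Int) (ps : List (Int × String)) (acc : List String) (cur : Int)
    (h : acc ≠ []) :
    pvLoopA max_chars ps acc cur =
      acc ++ (ps.map (fun p => pvFmt p.1 p.2)).take (pvCnt max_chars cur ps) := by
  induction ps generalizing acc cur with
  | nil => simp [pvLoopA]
  | cons p rest ih =>
    obtain ⟨i, l⟩ := p
    have hae : acc.isEmpty = false := by simpa [List.isEmpty_iff] using h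
    simp only [pvLoopA, pvCnt, List.map_cons, hae, Bool.not_false, Bool.true_and,
      decide_eq_true_eq]
    by_cases hle : cur + PySem.Str.len (pvFmt i l) + 1 ≤ max_chars
    · rw [if_neg (by omega), if_pos hle,
        ih (acc ++ [pvFmt i l]) _ (by simp), List.take_succ_cons, List.append_assoc]
      rfl
    · rw [if_pos (by omega), if_neg hle]
      simp

lemma pvLoopA_start (max_chars cur : Int) (i : Int) (l : String) (rest : List (Int × String)) :
    pvLoopA max_chars ((i, l) :: rest) [] cur =
      (((i, l) :: rest).map (fun p => pvFmt p.1 p.2)).take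
        (max 1 (pvCnt max_chars cur ((i, l) :: rest))) := by
  simp only [pvLoopA, pvCnt, List.map_cons, List.isEmpty_nil, Bool.not_true, Bool.false_and,
    Bool.false_eq_true, if_false, List.nil_append]
  rw [pvLoopA_ne _ _ _ _ (by simp)]
  by_cases hle : cur + PySem.Str.len (pvFmt i l) + 1 ≤ max_chars
  · rw [if_pos hle]
    have hmax : max 1 (pvCnt max_chars (cur + PySem.Str.len (pvFmt i l) + 1) rest + 1) =
        pvCnt max_chars (cur + PySem.Str.len (pvFmt i l) + 1) rest + 1 := by omega
    rw [hmax, List.take_succ_cons]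
    rfl
  · rw [if_neg hle, pvCnt_zero _ _ rest (by omega)]
    simp

-- the prefix-sum fold of B, in closed recursive form
def pvPrefixes (cur : Int) : List String → List Int
  | [] => []
  | e :: r => (cur + PySem.Str.len e + 1) :: pvPrefixes (cur + PySem.Str.len e + 1) r

lemma pvFold_eq (es : List String) (acc : List Int) (cur : Int) :
    (es.foldl (fun (st : List Int × Int) entry =>
        let running := st.2 + PySem.Str.len entry + 1
        (st.1 ++ [running], running)) (acc, cur)).1 = acc ++ pvPrefixes cur es := by
  induction es generalizing acc cur with
  | nil => simp [pvPrefixes]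
  | cons e r ih => simp only [List.foldl_cons, pvPrefixes, ih, List.append_assoc]; rfl

lemma pvCountP_prefixes_zero (max_chars cur : Int) (es : List String) (h : max_chars < cur) :
    (pvPrefixes cur es).countP (fun p => decide (p ≤ max_chars)) = 0 := by
  induction es generalizing cur with
  | nil => rfl
  | cons e r ih =>
    have hl := pvLen_nonneg e
    simp only [pvPrefixes, List.countP_cons, decide_eq_true_eq]
    rw [ih _ (by omega), if_neg (by omega)]

lemma pvCountP_prefixes (max_chars cur : Int) (ps : List (Int × String)) :
    (pvPrefixes cur (ps.map (fun p => pvFmt p.1 p.2))).countP (fun p => decide (p ≤ max_chars)) =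
      pvCnt max_chars cur ps := by
  induction ps generalizing cur with
  | nil => rfl
  | cons p rest ih =>
    obtain ⟨i, l⟩ := p
    simp only [List.map_cons, pvPrefixes, List.countP_cons, pvCnt, decide_eq_true_eq]
    by_cases hle : cur + PySem.Str.len (pvFmt i l) + 1 ≤ max_chars
    · rw [ih, if_pos hle, if_pos hle]
    · rw [pvCountP_prefixes_zero _ _ _ (by omega), if_neg hle, if_neg hle]

lemma pv_main (lines : List String) (max_chars : Int) (hne : lines ≠ []) :
    (PySem.Str.join "\n" (pvLoopA max_chars (PySem.List.enumerate lines 1) [] 0),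
     decide (((pvLoopA max_chars (PySem.List.enumerate lines 1) [] 0).length : Int) < (lines.length : Int)),
     ((lines.length : Int)),
     ((pvLoopA max_chars (PySem.List.enumerate lines 1) [] 0).length : Int)) =
    (let numbered := (PySem.List.enumerate lines 1).map (fun p => pvFmt p.1 p.2)
     let st := numbered.foldl
        (fun (st : List Int × Int) entry =>
          let running := st.2 + PySem.Str.len entry + 1
          (st.1 ++ [running], running)) ([], 0)
     let prefixSums := st.1
     let visible : Int := max 1 ((prefixSums.countP (fun p => decide (p ≤ max_chars))) : Int)
     (PySem.Str.join "\n" (PySem.List.slice numbered none (some visible)),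
      decide (visible < (lines.length : Int)),
      (lines.length : Int),
      visible)) := by
  obtain ⟨l0, rest, hcons⟩ := List.exists_cons_of_ne_nil hne
  subst hcons
  dsimp only
  rw [pvFold_eq, List.nil_append, pvCountP_prefixes]
  rw [show PySem.List.enumerate (l0 :: rest) 1 = (1, l0) :: PySem.List.enumerate rest 2 by
        rw [PySem.List.enumerate_cons]; norm_num,
      pvLoopA_start]
  set ps := ((1 : Int), l0) :: PySem.List.enumerate rest 2 with hps
  set c := pvCnt max_chars 0 ps with hc
  have hclen : c ≤ ps.length := pvCnt_le_length _ _ _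
  have hpslen : ps.length = rest.length + 1 := by
    rw [hps, List.length_cons, PySem.List.length_enumerate]
  have hvis : (max 1 ((c : Int))) = ((max 1 c : Nat) : Int) := by omega
  rw [hvis, PySem.List.slice_to _ (by omega), Int.toNat_natCast]
  have htl : ((ps.map (fun p => pvFmt p.1 p.2)).take (max 1 c)).length = max 1 c := by
    rw [List.length_take, List.length_map]
    omega
  rw [htl]

-- ===== VERDICT (by name: the statement is the Claim_ definition above) =====
theorem prepare_numbered_source_py_spec : Claim_equal_prepare_numbered_source_py := by
  intro source_text max_chars _hdom
  unfold Spec_prepare_numbered_source_py prepare_numbered_source_py prepare_numbered_source_py_alt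
  refine pv_main _ max_chars ?_
  dsimp only
  split
  · simp
  · rename_i h; simpa [List.isEmpty_iff] using h
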